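-- pv_equiv track=rewrite | github.com/rupeshmahto-design/threatarc | report_parser.py | _infer_overall_rating
-- ===== SOURCE A (Python) =====
-- from typing import Optional, Dict, Any, List, Tuple
--
-- def _infer_overall_rating(findings: List[Dict]) -> str:
--     """Infer overall rating from findings list."""
--     if any(f.get("severity") == "CRITICAL" for f in findings):
--         return "CRITICAL"
--     if any(f.get("severity") == "HIGH" for f in findings):
--         return "HIGH"
--     if any(f.get("severity") == "MEDIUM" for f in findings):
--         return "MEDIUM"
--     return "LOW"
-- ===== SOURCE B (Python) =====
-- _RANK = {"CRITICAL": 3, "HIGH": 2, "MEDIUM": 1}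
-- _LABEL = {v: k for k, v in _RANK.items()}
--
-- def _infer_overall_rating(findings):
--     """Infer overall rating from findings list."""
--     m = max((_RANK.get(f.get("severity"), 0) for f in findings), default=0)
--     return _LABEL.get(m, "LOW")
-- ===== Notes on version B (the rewrite author's own statement) =====
-- stated objective: simpler
-- what changed: Replaces the four priority-ordered any() scans by a single pass that keeps the maximum of a severity-rank table and maps the maximum back to its label.
import Mathlib
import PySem

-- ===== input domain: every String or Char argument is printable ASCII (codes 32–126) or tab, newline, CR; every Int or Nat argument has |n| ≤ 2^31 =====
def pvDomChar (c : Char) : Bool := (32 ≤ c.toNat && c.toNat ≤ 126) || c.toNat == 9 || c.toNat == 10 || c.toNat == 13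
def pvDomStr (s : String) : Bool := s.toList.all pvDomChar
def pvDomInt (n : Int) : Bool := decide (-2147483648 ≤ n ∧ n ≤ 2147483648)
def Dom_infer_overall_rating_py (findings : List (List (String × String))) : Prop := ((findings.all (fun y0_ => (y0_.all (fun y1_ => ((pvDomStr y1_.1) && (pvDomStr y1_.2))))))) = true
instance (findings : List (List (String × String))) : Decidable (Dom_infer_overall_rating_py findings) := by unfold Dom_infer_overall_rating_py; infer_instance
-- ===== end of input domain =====

-- B replaces A's four priority-ordered any() scans by one pass keeping the maximum severity rank (simpler).

-- ===== PORT A =====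
-- f.get("severity") on the dict f
def pvGetSev (f : List (String × String)) : Option String :=
  (PySem.Dict.mk f).get? "severity"

def infer_overall_rating_py (findings : List (List (String × String))) : String :=
  if findings.any (fun f => pvGetSev f == some "CRITICAL") then "CRITICAL"
  else if findings.any (fun f => pvGetSev f == some "HIGH") then "HIGH"
  else if findings.any (fun f => pvGetSev f == some "MEDIUM") then "MEDIUM"
  else "LOW"

-- ===== PORT B =====
def pvRank : PySem.Dict String Int :=
  PySem.Dict.ofList [("CRITICAL", 3), ("HIGH", 2), ("MEDIUM", 1)]

def pvLabel : PySem.Dict Int String :=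
  PySem.Dict.ofList [(3, "CRITICAL"), (2, "HIGH"), (1, "MEDIUM")]

-- _RANK.get(f.get("severity"), 0); a None key matches no string key, giving the default 0
def pvRankOf (f : List (String × String)) : Int :=
  match pvGetSev f with
  | some s => pvRank.getD s 0
  | none => 0

def infer_overall_rating_py_alt (findings : List (List (String × String))) : String :=
  pvLabel.getD (findings.foldl (fun m f => max m (pvRankOf f)) 0) "LOW"

-- ===== PRECONDITION & SPEC =====
def Spec_infer_overall_rating_py (findings : List (List (String × String))) (out : String) : Prop := out = infer_overall_rating_py_alt findings
instance (findings : List (List (String × String))) (out : String) : Decidable (Spec_infer_overall_rating_py findings out) := by unfold Spec_infer_overall_rating_py; infer_instance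

-- ===== CLAIM (what is proved, stated in full; the proofs are below) =====
def Claim_equal_infer_overall_rating_py : Prop := ∀ (findings : List (List (String × String))), Dom_infer_overall_rating_py findings → Spec_infer_overall_rating_py findings (infer_overall_rating_py findings)

-- ===== LEMMAS AND PROOFS =====

theorem pvRankOf_cases (f : List (String × String)) :
    pvRankOf f = (if pvGetSev f == some "CRITICAL" then 3
      else if pvGetSev f == some "HIGH" then 2
      else if pvGetSev f == some "MEDIUM" then 1 else (0 : Int)) := by
  unfold pvRankOf
  cases h : pvGetSev f with
  | none => simp
  | some s =>
    by_cases h1 : s = "CRITICAL"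
    · subst h1; decide
    by_cases h2 : s = "HIGH"
    · subst h2; decide
    by_cases h3 : s = "MEDIUM"
    · subst h3; decide
    have g1 : ("CRITICAL" == s) = false := by simpa using Ne.symm h1
    have g2 : ("HIGH" == s) = false := by simpa using Ne.symm h2
    have g3 : ("MEDIUM" == s) = false := by simpa using Ne.symm h3
    simp [pvRank, PySem.Dict.getD, PySem.Dict.ofList, PySem.Dict.update, PySem.Dict.insert,
      PySem.Dict.empty, PySem.Dict.get?, PySem.Dict.contains, List.find?,
      g1, g2, g3, h1, h2, h3]

theorem pvRankOf_nonneg (f : List (String × String)) : 0 ≤ pvRankOf f := by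
  rw [pvRankOf_cases]; split_ifs <;> omega

theorem pvFold_max (l : List (List (String × String))) (m : Int) (hm : 0 ≤ m) :
    l.foldl (fun m f => max m (pvRankOf f)) m = max m (l.foldl (fun m f => max m (pvRankOf f)) 0) := by
  induction l generalizing m with
  | nil => simp only [List.foldl_nil]; omega
  | cons f l ih =>
    simp only [List.foldl_cons]
    have h0 := pvRankOf_nonneg f
    rw [ih (max m (pvRankOf f)) (by omega), ih (max 0 (pvRankOf f)) (by omega)]
    omega

theorem pvFold_cons (f : List (String × String)) (l : List (List (String × String))) :
    (f :: l).foldl (fun m f => max m (pvRankOf f)) 0 =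
      max (pvRankOf f) (l.foldl (fun m f => max m (pvRankOf f)) 0) := by
  simp only [List.foldl_cons]
  have h0 := pvRankOf_nonneg f
  rw [pvFold_max l (max 0 (pvRankOf f)) (by omega)]
  omega

-- 64-case truth table over the two priority encodings, closed by kernel evaluation
theorem pvGrid (a b c d e g : Bool) :
    max (if a then 3 else if b then 2 else if c then 1 else (0 : Int))
        (if d then 3 else if e then 2 else if g then 1 else 0) =
      (if a || d then 3 else if b || e then 2 else if c || g then 1 else 0) := by
  cases a <;> cases b <;> cases c <;> cases d <;> cases e <;> cases g <;> decide

theorem pvFold_char (l : List (List (String × String))) :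
    l.foldl (fun m f => max m (pvRankOf f)) 0 =
      (if l.any (fun f => pvGetSev f == some "CRITICAL") then 3
       else if l.any (fun f => pvGetSev f == some "HIGH") then 2
       else if l.any (fun f => pvGetSev f == some "MEDIUM") then 1 else (0 : Int)) := by
  induction l with
  | nil => simp
  | cons f l ih =>
    rw [pvFold_cons, ih, pvRankOf_cases]
    simp only [List.any_cons]
    exact pvGrid _ _ _ _ _ _

-- ===== VERDICT (by name: the statement is the Claim_ definition above) =====
theorem infer_overall_rating_py_spec : Claim_equal_infer_overall_rating_py := by
  intro findings _
  unfold Spec_infer_overall_rating_py infer_overall_rating_py infer_overall_rating_py_alt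
  rw [pvFold_char]
  by_cases h1 : findings.any (fun f => pvGetSev f == some "CRITICAL") = true <;>
    by_cases h2 : findings.any (fun f => pvGetSev f == some "HIGH") = true <;>
    by_cases h3 : findings.any (fun f => pvGetSev f == some "MEDIUM") = true <;>
    simp only [h1, h2, h3, if_true, if_false, Bool.false_eq_true] <;> decide
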